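-- pv_equiv track=rewrite | github.com/CasuFrost/University_notes | Primo Anno/Primo Semestre/Fondamenti di Programmazione/HomeWorks/HW2-req/program01BACKUP.py | xkcd_to_list_of_weights
-- ===== SOURCE A (Python) =====
-- def xkcd_to_list_of_weights(xkcd : str) -> list[int]:
--     '''
--     Spezza una stringa in codifica XKCD nella corrispondente
--     lista di interi, ciascuno corrispondente al peso di una lettera romana
--
--     Parameters
--     xkcd : str              stringa nel formato XKCD
--     Returns
--     list[int]               lista di 'pesi' corrispondenti alle lettere romane
--
--     Esempio: '10010010010100511' -> [100, 100, 100, 10, 100, 5, 1, 1,]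
--     '''
--     listaInteri = []
--     TenXmultiplayer=1
--     for i in range(len(xkcd)-1,-1,-1):
--         if int(xkcd[i])!=0:
--             listaInteri.append(int(xkcd[i])*TenXmultiplayer)
--
--             TenXmultiplayer=1
--         else:
--             TenXmultiplayer=TenXmultiplayer*10
--
--     return list(reversed(listaInteri))
-- ===== SOURCE B (Python) =====
-- def xkcd_to_list_of_weights(xkcd : str) -> list[int]:
--     '''Forward single pass: each nonzero digit, followed by k zeros, yields d*10**k.'''
--     result = []
--     i = 0
--     n = len(xkcd)
--     while i < n:
--         d = int(xkcd[i])
--         i += 1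
--         if d == 0:
--             continue
--         k = 0
--         while i < n and xkcd[i] == '0':
--             k += 1
--             i += 1
--         result.append(d * 10 ** k)
--     return result
-- ===== Notes on version B (the rewrite author's own statement) =====
-- stated objective: idiomatic
-- what changed: Replaces the backwards scan carrying a running power-of-ten multiplier plus a final reversal by a single forward pass that, at each nonzero digit, counts the zeros following it and appends d*10**k directly.
import Mathlib
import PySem

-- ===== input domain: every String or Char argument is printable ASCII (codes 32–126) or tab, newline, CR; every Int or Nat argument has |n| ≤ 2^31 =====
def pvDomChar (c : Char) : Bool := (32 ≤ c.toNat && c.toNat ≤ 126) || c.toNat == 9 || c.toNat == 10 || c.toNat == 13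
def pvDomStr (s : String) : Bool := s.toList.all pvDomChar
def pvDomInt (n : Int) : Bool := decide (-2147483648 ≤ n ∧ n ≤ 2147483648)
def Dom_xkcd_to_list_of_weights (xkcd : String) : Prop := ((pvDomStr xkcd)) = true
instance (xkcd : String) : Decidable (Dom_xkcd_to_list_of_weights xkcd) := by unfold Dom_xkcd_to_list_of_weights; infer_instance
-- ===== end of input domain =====

-- B replaces A's backwards scan (running power-of-ten multiplier + final reversal) by a
-- forward pass that counts the zeros after each nonzero digit; idiomatic, same O(n) cost.

-- ===== PORT A =====
-- int(xkcd[i]) for a single character: exact on digit strings; the ValueError on a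
-- non-digit character is excluded by Pre_ below.
def pvDigit (c : Char) : Int := (c.toNat : Int) - 48

-- one iteration of A's loop: state = (listaInteri, TenXmultiplayer)
def pvStepA (s : List Int × Int) (c : Char) : List Int × Int :=
  if pvDigit c ≠ 0 then (s.1 ++ [pvDigit c * s.2], 1) else (s.1, s.2 * 10)

-- A: for i in range(len(xkcd)-1,-1,-1) = a left fold over the reversed character list,
-- then list(reversed(listaInteri)).
def xkcd_to_list_of_weights (xkcd : String) : List Int :=
  ((xkcd.toList.reverse.foldl pvStepA ([], 1)).1).reverse

-- ===== PORT B =====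
-- B's outer while loop: skip a zero digit, otherwise count the zeros that follow
-- (takeWhile/dropWhile = Source B's inner while advancing i) and emit d * 10^k.
def pvGoB : List Char → List Int
  | [] => []
  | c :: t =>
    if pvDigit c = 0 then pvGoB t
    else pvDigit c * 10 ^ (t.takeWhile (· == '0')).length :: pvGoB (t.dropWhile (· == '0'))
  termination_by l => l.length
  decreasing_by
    · simp
    · exact Nat.lt_succ_of_le (List.length_dropWhile_le _ _)

def xkcd_to_list_of_weights_alt (xkcd : String) : List Int :=
  pvGoB xkcd.toList

-- ===== PRECONDITION & SPEC =====
-- Pre_: every character is an ASCII digit; on any other character A's int(xkcd[i])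
-- raises ValueError (and B's does too).
def Pre_xkcd_to_list_of_weights (xkcd : String) : Prop :=
  xkcd.toList.all PySem.Chars.isdigit = true
instance (xkcd : String) : Decidable (Pre_xkcd_to_list_of_weights xkcd) := by
  unfold Pre_xkcd_to_list_of_weights; infer_instance

def pvWitness_xkcd_to_list_of_weights : String := "105"

def Spec_xkcd_to_list_of_weights (xkcd : String) (out : List Int) : Prop := out = xkcd_to_list_of_weights_alt xkcd
instance (xkcd : String) (out : List Int) : Decidable (Spec_xkcd_to_list_of_weights xkcd out) := by unfold Spec_xkcd_to_list_of_weights; infer_instance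

-- ===== CLAIM (what is proved, stated in full; the proofs are below) =====
def Claim_equal_xkcd_to_list_of_weights : Prop := ∀ (xkcd : String), Dom_xkcd_to_list_of_weights xkcd → Pre_xkcd_to_list_of_weights xkcd → Spec_xkcd_to_list_of_weights xkcd (xkcd_to_list_of_weights xkcd)

-- ===== LEMMAS AND PROOFS =====

theorem pvDigit_eq_zero_iff (c : Char) : pvDigit c = 0 ↔ c = '0' := by
  constructor
  · intro h
    have : c.toNat = 48 := by unfold pvDigit at h; omega
    have : c.val = 48 := by
      have := this; unfold Char.toNat at this
      exact UInt32.toNat_inj.mp this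
    exact Char.ext this
  · intro h; subst h; decide

-- skipping leading zeros does not change B's result
theorem pvGoB_dropWhile (l : List Char) :
    pvGoB (l.dropWhile (· == '0')) = pvGoB l := by
  induction l with
  | nil => rfl
  | cons c t ih =>
    by_cases h : c = '0'
    · subst h
      rw [List.dropWhile_cons_of_pos (by decide)]
      rw [ih]
      rw [pvGoB]
      simp [pvDigit_eq_zero_iff]
    · rw [List.dropWhile_cons_of_neg (by simpa using h)]

-- invariant of A's right-to-left scan: after processing l, the accumulator holds l's
-- groups in reverse order and the multiplier is 10^(number of leading zeros of l)
theorem pvFoldr_char (l : List Char) :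
    l.foldr (fun c s => pvStepA s c) ([], 1) =
      ((pvGoB l).reverse, 10 ^ (l.takeWhile (· == '0')).length) := by
  induction l with
  | nil => simp [pvGoB]
  | cons c t ih =>
    simp only [List.foldr_cons, ih]
    by_cases h : pvDigit c = 0
    · have hc : c = '0' := (pvDigit_eq_zero_iff c).mp h
      subst hc
      rw [pvStepA, pvGoB]
      simp only [if_pos h]
      rw [List.takeWhile_cons_of_pos (by decide)]
      simp [pow_succ, mul_comm]
      exact h
    · rw [pvStepA, pvGoB]
      simp only [if_neg h]
      have hc : ¬ (c == '0') = true := by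
        simp only [beq_iff_eq]
        intro hc; exact h ((pvDigit_eq_zero_iff c).mpr hc)
      rw [List.takeWhile_cons_of_neg (p := fun x => x == '0') hc]
      simp [pvGoB_dropWhile]
      exact h

-- ===== VERDICT (by name: the statement is the Claim_ definition above) =====
theorem xkcd_to_list_of_weights_spec : Claim_equal_xkcd_to_list_of_weights := by
  intro xkcd _ _
  unfold Spec_xkcd_to_list_of_weights xkcd_to_list_of_weights xkcd_to_list_of_weights_alt
  rw [List.foldl_reverse, pvFoldr_char]
  simp
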